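-- pv_equiv track=rewrite | github.com/novakovichid/Flow.Launcher.Plugin.AliceAI | plugin/main.py | _parse_action_order
-- ===== SOURCE A (Python) =====
-- def _parse_action_order(value: str) -> list:
--     known = ["copy", "preview", "editor"]
--     tokens = [token.strip().lower() for token in (value or "").split(",")]
--     order = []
--     seen = set()
--     for token in tokens:
--         if token and token in known and token not in seen:
--             order.append(token)
--             seen.add(token)
--     for token in known:
--         if token not in seen:
--             order.append(token)
--     return order
-- ===== SOURCE B (Python) =====
-- def _parse_action_order(value: str) -> list:
--     known = ["copy", "preview", "editor"]
--     tokens = [token.strip().lower() for token in (value or "").split(",")]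
--     position = {}
--     for i, token in enumerate(tokens):
--         if token not in position:
--             position[token] = i
--     return sorted(known, key=lambda action: position.get(action, len(tokens)))
-- ===== Notes on version B (the rewrite author's own statement) =====
-- stated objective: alternative
-- what changed: Replaces A's two sequential filter/append loops with dedup set tracking by a first-occurrence position index built in one pass, then a stable sort of the fixed known list keyed by that index (missing actions keyed past the end so stability keeps their default order).
import Mathlib
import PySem

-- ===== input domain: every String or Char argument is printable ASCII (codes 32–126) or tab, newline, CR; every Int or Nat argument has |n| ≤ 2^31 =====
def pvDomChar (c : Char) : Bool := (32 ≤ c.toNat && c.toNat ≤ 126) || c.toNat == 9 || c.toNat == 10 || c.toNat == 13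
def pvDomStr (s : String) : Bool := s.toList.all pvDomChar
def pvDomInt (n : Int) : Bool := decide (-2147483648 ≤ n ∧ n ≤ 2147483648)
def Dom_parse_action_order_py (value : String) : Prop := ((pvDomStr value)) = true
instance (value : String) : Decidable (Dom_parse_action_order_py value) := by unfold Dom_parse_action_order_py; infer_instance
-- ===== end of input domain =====

-- B replaces A's two sequential filter/append loops by a first-occurrence position index
-- plus one stable sort of the fixed known list (alternative decomposition, same cost).

-- ===== PORT A =====
-- loop body of A's first loop: append token if non-empty, known and unseen
def aStep (st : List String × PySem.Set String) (token : String) :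
    List String × PySem.Set String :=
  if (!(token == "") && (["copy", "preview", "editor"] : List String).contains token
        && !(PySem.Set.contains st.2 token)) then
    (st.1 ++ [token], PySem.Set.add st.2 token)
  else st

def parse_action_order_py (value : String) : List String :=
  let tokens := ((PySem.Str.split? (if value == "" then "" else value) ",").getD []).map
      (fun token => PySem.Str.lower (PySem.Str.strip token))
  let st := tokens.foldl aStep ([], PySem.Set.empty)
  (["copy", "preview", "editor"] : List String).foldl
    (fun order token => if PySem.Set.contains st.2 token then order else order ++ [token]) st.1

-- ===== PORT B =====
-- loop body of B's position-building loop: record first index of each token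
def bStep (d : PySem.Dict String Int) (it : Int × String) : PySem.Dict String Int :=
  if d.contains it.2 then d else d.insert it.2 it.1


def parse_action_order_py_alt (value : String) : List String :=
  let tokens := ((PySem.Str.split? (if value == "" then "" else value) ",").getD []).map
      (fun token => PySem.Str.lower (PySem.Str.strip token))
  let position := (PySem.List.enumerate tokens).foldl bStep PySem.Dict.empty
  PySem.List.sorted ["copy", "preview", "editor"]
    (fun action => position.getD action (tokens.length : Int)) false

-- ===== PRECONDITION & SPEC =====
def Spec_parse_action_order_py (value : String) (out : List String) : Prop := out = parse_action_order_py_alt value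
instance (value : String) (out : List String) : Decidable (Spec_parse_action_order_py value out) := by unfold Spec_parse_action_order_py; infer_instance

-- ===== CLAIM (what is proved, stated in full; the proofs are below) =====
def Claim_equal_parse_action_order_py : Prop := ∀ (value : String), Dom_parse_action_order_py value → Spec_parse_action_order_py value (parse_action_order_py value)

-- ===== LEMMAS AND PROOFS =====
def goodTok (t : String) : Bool :=
  !(t == "") && (["copy", "preview", "editor"] : List String).contains t
def auxA : List String → List String → List String
  | [], _ => []
  | t :: ts, sn =>
    if goodTok t && !(sn.contains t) then t :: auxA ts (sn ++ [t]) else auxA ts sn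

theorem idxOf_cons_ne (t a : String) (ts : List String) (h : a ≠ t) :
    List.idxOf a (t :: ts) = List.idxOf a ts + 1 := by
  rw [List.idxOf_cons]
  simp [beq_eq_false_iff_ne.2 (Ne.symm h)]

theorem not_mem_of_cond (sn : List String) (t : String)
    (h : (goodTok t && !(sn.contains t)) = true) : t ∉ sn := by
  intro hmem
  have h2 := (Bool.and_eq_true .. ▸ h).2
  rw [List.contains_iff_mem.2 hmem] at h2
  simp at h2

theorem aStep_pos (ord sn : List String) (t : String) (h : (goodTok t && !(sn.contains t)) = true) :
    aStep (ord, sn) t = (ord ++ [t], sn ++ [t]) := by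
  have hm : t ∉ sn := not_mem_of_cond sn t h
  unfold goodTok at h
  simp only [aStep]
  rw [if_pos (by exact h)]
  simp [PySem.Set.add, PySem.Set.contains, hm]

theorem aStep_neg (ord sn : List String) (t : String) (h : ¬ (goodTok t && !(sn.contains t)) = true) :
    aStep (ord, sn) t = (ord, sn) := by
  unfold goodTok at h
  simp only [aStep]
  rw [if_neg (by exact h)]

theorem foldlA_fst (ts : List String) : ∀ (ord sn : List String),
    (ts.foldl aStep (ord, sn)).1 = ord ++ auxA ts sn := by
  induction ts with
  | nil => intro ord sn; simp [auxA]
  | cons t ts ih =>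
    intro ord sn
    rw [List.foldl_cons, auxA]
    by_cases h : (goodTok t && !(sn.contains t)) = true
    · rw [aStep_pos _ _ _ h, if_pos h, ih]; simp
    · rw [aStep_neg _ _ _ h, if_neg h, ih]

theorem foldlA_snd_mem (ts : List String) : ∀ (ord sn : List String) (x : String),
    x ∈ (ts.foldl aStep (ord, sn)).2 ↔ x ∈ sn ∨ (goodTok x = true ∧ x ∈ ts) := by
  induction ts with
  | nil => intro ord sn x; simp
  | cons t ts ih =>
    intro ord sn x
    rw [List.foldl_cons]
    by_cases h : (goodTok t && !(sn.contains t)) = true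
    · rw [aStep_pos _ _ _ h, ih]
      have hg : goodTok t = true := (Bool.and_eq_true .. ▸ h).1
      constructor
      · rintro (hx | ⟨hgx, hxts⟩)
        · rcases List.mem_append.1 hx with hx | hx
          · exact Or.inl hx
          · simp at hx; subst hx; exact Or.inr ⟨hg, by simp⟩
        · exact Or.inr ⟨hgx, by simp [hxts]⟩
      · rintro (hx | ⟨hgx, hxts⟩)
        · exact Or.inl (by simp [hx])
        · rcases List.mem_cons.1 hxts with rfl | hx
          · exact Or.inl (by simp)
          · exact Or.inr ⟨hgx, hx⟩
    · rw [aStep_neg _ _ _ h, ih]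
      constructor
      · rintro (hx | ⟨hgx, hxts⟩)
        · exact Or.inl hx
        · exact Or.inr ⟨hgx, List.mem_cons_of_mem _ hxts⟩
      · rintro (hx | ⟨hgx, hxts⟩)
        · exact Or.inl hx
        · rcases List.mem_cons.1 hxts with rfl | hx
          · have h' := h; simp [hgx] at h'; exact Or.inl h'
          · exact Or.inr ⟨hgx, hx⟩

theorem mem_auxA (ts : List String) : ∀ (sn : List String) (x : String),
    x ∈ auxA ts sn ↔ goodTok x = true ∧ x ∈ ts ∧ x ∉ sn := by
  induction ts with
  | nil => intro sn x; simp [auxA]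
  | cons t ts ih =>
    intro sn x
    rw [auxA]
    by_cases h : (goodTok t && !(sn.contains t)) = true
    · have hg : goodTok t = true := (Bool.and_eq_true .. ▸ h).1
      have hns : t ∉ sn := not_mem_of_cond sn t h
      rw [if_pos h]
      simp only [List.mem_cons, ih]
      constructor
      · rintro (rfl | ⟨hgx, hxts, hxsn⟩)
        · exact ⟨hg, Or.inl rfl, hns⟩
        · simp at hxsn
          exact ⟨hgx, Or.inr hxts, hxsn.1⟩
      · rintro ⟨hgx, (rfl | hxts), hxsn⟩
        · exact Or.inl rfl
        · by_cases hxt : x = t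
          · exact Or.inl hxt
          · exact Or.inr ⟨hgx, hxts, by simp [hxsn, hxt]⟩
    · rw [if_neg h, ih]
      simp only [List.mem_cons]
      constructor
      · rintro ⟨hgx, hxts, hxsn⟩
        exact ⟨hgx, Or.inr hxts, hxsn⟩
      · rintro ⟨hgx, (rfl | hxts), hxsn⟩
        · have h' := h; simp [hgx] at h'; exact absurd h' hxsn
        · exact ⟨hgx, hxts, hxsn⟩

theorem pairwise_auxA (ts : List String) : ∀ (sn : List String),
    (auxA ts sn).Pairwise (fun a b => ts.idxOf a < ts.idxOf b) := by
  induction ts with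
  | nil => intro sn; simp [auxA]
  | cons t ts ih =>
    intro sn
    rw [auxA]
    by_cases h : (goodTok t && !(sn.contains t)) = true
    · rw [if_pos h]
      refine List.pairwise_cons.2 ⟨?_, ?_⟩
      · intro b hb
        have hbn : b ∉ sn ++ [t] := ((mem_auxA ts _ b).1 hb).2.2
        have hbt : b ≠ t := by simp at hbn; exact hbn.2
        rw [idxOf_cons_ne _ _ _ hbt]
        simp
      · refine ((ih (sn ++ [t])).imp_of_mem ?_)
        intro a b ha hb hlt
        have hat : a ≠ t := by have := ((mem_auxA ts _ a).1 ha).2.2; simp at this; exact this.2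
        have hbt : b ≠ t := by have := ((mem_auxA ts _ b).1 hb).2.2; simp at this; exact this.2
        rw [idxOf_cons_ne _ _ _ hat, idxOf_cons_ne _ _ _ hbt]
        omega
    · rw [if_neg h]
      refine ((ih sn).imp_of_mem ?_)
      intro a b ha hb hlt
      obtain ⟨hga, -, hasn⟩ := (mem_auxA ts _ a).1 ha
      obtain ⟨hgb, -, hbsn⟩ := (mem_auxA ts _ b).1 hb
      have hat : a ≠ t := by rintro rfl; have h' := h; simp [hga] at h'; exact hasn h'
      have hbt : b ≠ t := by rintro rfl; have h' := h; simp [hgb] at h'; exact hbsn h'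
      rw [idxOf_cons_ne _ _ _ hat, idxOf_cons_ne _ _ _ hbt]
      omega
theorem posDict_getD (ts : List String) : ∀ (s : Int) (d : PySem.Dict String Int) (a : String) (dflt : Int),
    ((PySem.List.enumerate ts s).foldl bStep d).getD a dflt =
      if d.contains a then d.getD a dflt
      else if a ∈ ts then s + (ts.idxOf a : Int) else dflt := by
  induction ts with
  | nil =>
    intro s d a dflt
    simp only [PySem.List.enumerate_nil, List.foldl_nil, List.not_mem_nil, if_false]
    by_cases h : d.contains a = true
    · rw [if_pos h]
    · rw [if_neg h]
      simp [pysem, Bool.not_eq_true .. ▸ h]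
  | cons t ts ih =>
    intro s d a dflt
    rw [PySem.List.enumerate_cons, List.foldl_cons]
    by_cases hc : d.contains t = true
    · have : bStep d (s, t) = d := by simp [bStep, hc]
      rw [this, ih]
      by_cases hat : a = t
      · subst hat; rw [if_pos hc, if_pos hc]
      · by_cases hda : d.contains a = true
        · rw [if_pos hda, if_pos hda]
        · rw [if_neg hda, if_neg hda]
          by_cases hm : a ∈ ts
          · rw [if_pos hm, if_pos (by simp [hm])]
            rw [List.idxOf_cons]
            simp [beq_eq_false_iff_ne.2 (fun h => hat h.symm)]
            ring
          · rw [if_neg hm, if_neg (by simp [hm, hat])]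
    · have : bStep d (s, t) = d.insert t s := by simp [bStep, hc]
      rw [this, ih]
      by_cases hat : a = t
      · subst hat
        rw [if_pos (by simp), if_neg hc,
            if_pos (by simp), PySem.Dict.getD_insert]
        simp
      · rw [PySem.Dict.contains_insert]
        have hba : (a == t) = false := beq_eq_false_iff_ne.2 hat
        rw [hba]
        simp only [Bool.false_or]
        by_cases hda : d.contains a = true
        · rw [if_pos hda, if_pos hda, PySem.Dict.getD_insert, if_neg hat]
        · rw [if_neg hda, if_neg hda]
          by_cases hm : a ∈ ts
          · rw [if_pos hm, if_pos (by simp [hm])]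
            rw [List.idxOf_cons]
            simp [beq_eq_false_iff_ne.2 (fun h => hat h.symm)]
            ring
          · rw [if_neg hm, if_neg (by simp [hm, hat])]

theorem sorted3 (key : String → Int) :
    PySem.List.sorted ["copy", "preview", "editor"] key false =
      if key "preview" < key "copy" then
        if key "editor" < key "preview" then ["editor", "preview", "copy"]
        else if key "editor" < key "copy" then ["preview", "editor", "copy"]
        else ["preview", "copy", "editor"]
      else
        if key "editor" < key "copy" then ["editor", "copy", "preview"]
        else if key "editor" < key "preview" then ["copy", "editor", "preview"]
        else ["copy", "preview", "editor"] := by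
  simp only [PySem.List.sorted, PySem.List.insertBy, List.foldl_cons, List.foldl_nil]
  split_ifs <;> simp_all [PySem.List.insertBy] <;> first | rfl | omega | (split_ifs <;> first | rfl | omega)

theorem eq_nil_of_mem {α : Type} (L : List α) (h : ∀ x, x ∉ L) : L = [] :=
  List.eq_nil_iff_forall_not_mem.2 h

theorem eq_singleton_of {α : Type} (L : List α) (a : α) (hnd : L.Nodup)
    (h : ∀ x, x ∈ L ↔ x = a) : L = [a] := by
  cases L with
  | nil => exact absurd ((h a).2 rfl) (by simp)
  | cons y ys =>
    have hy : y = a := (h y).1 (by simp)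
    subst hy
    cases ys with
    | nil => rfl
    | cons z zs =>
      have hz : z = y := (h z).1 (by simp)
      subst hz
      simp at hnd

theorem eq_pair_of {α : Type} (L : List α) (r : α → α → Prop) (a b : α)
    (hpw : L.Pairwise r) (hirr : ∀ x y, r x y → r y x → False)
    (h : ∀ x, x ∈ L ↔ x = a ∨ x = b) (hr : r a b) : L = [a, b] := by
  have hab : a ≠ b := fun he => hirr a b hr (he ▸ hr)
  have hnd : L.Nodup := hpw.imp_of_mem (by
    intro x y _ _ hrxy heq
    exact hirr x y hrxy (by rw [heq] at hrxy ⊢; exact hrxy))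
  have hperm : L.Perm [a, b] := (List.perm_ext_iff_of_nodup hnd (by simp [hab])).2
    (fun x => by rw [h x]; simp)
  refine List.Perm.eq_of_pairwise (le := r) ?_ hpw (by simp [hr]) hperm
  intro x y _ _ hxy hyx
  exact absurd hyx (fun hyx => hirr x y hxy hyx)

theorem eq_triple_of {α : Type} (L : List α) (r : α → α → Prop) (a b c : α)
    (hpw : L.Pairwise r) (hirr : ∀ x y, r x y → r y x → False)
    (h : ∀ x, x ∈ L ↔ x = a ∨ x = b ∨ x = c)
    (hab : r a b) (hbc : r b c) (hac : r a c) : L = [a, b, c] := by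
  have hne1 : a ≠ b := fun he => hirr a b hab (he ▸ hab)
  have hne2 : b ≠ c := fun he => hirr b c hbc (he ▸ hbc)
  have hne3 : a ≠ c := fun he => hirr a c hac (he ▸ hac)
  have hnd : L.Nodup := hpw.imp_of_mem (by
    intro x y _ _ hrxy heq
    exact hirr x y hrxy (by rw [heq] at hrxy ⊢; exact hrxy))
  have hperm : L.Perm [a, b, c] := (List.perm_ext_iff_of_nodup hnd (by simp [hne1, hne2, hne3])).2
    (fun x => by rw [h x]; simp)
  refine List.Perm.eq_of_pairwise (le := r) ?_ hpw (by simp [hab, hbc, hac]) hperm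
  intro x y _ _ hxy hyx
  exact absurd hyx (fun hyx => hirr x y hxy hyx)

theorem core (ts : List String) :
    (["copy", "preview", "editor"] : List String).foldl
      (fun order token =>
        if PySem.Set.contains (ts.foldl aStep (([] : List String), (PySem.Set.empty : PySem.Set String))).2 token
        then order else order ++ [token])
      (ts.foldl aStep (([] : List String), (PySem.Set.empty : PySem.Set String))).1
    = PySem.List.sorted ["copy", "preview", "editor"]
        (fun action =>
          ((PySem.List.enumerate ts 0).foldl bStep PySem.Dict.empty).getD action (ts.length : Int)) false := by
  have hkey : (fun action => ((PySem.List.enumerate ts 0).foldl bStep PySem.Dict.empty).getD action (ts.length : Int))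
      = (fun action => (ts.idxOf action : Int)) := by
    funext a
    rw [posDict_getD]
    rw [if_neg (by simp [PySem.Dict.contains_empty])]
    by_cases hm : a ∈ ts
    · rw [if_pos hm]; ring
    · rw [if_neg hm, List.idxOf_eq_length hm]
  rw [hkey, sorted3]
  rw [List.foldl_cons, List.foldl_cons, List.foldl_cons, List.foldl_nil]
  rw [foldlA_fst ts [] PySem.Set.empty]
  simp only [List.nil_append]
  have hcont : ∀ k : String, goodTok k = true →
      ((PySem.Set.contains (ts.foldl aStep (([] : List String), (PySem.Set.empty : PySem.Set String))).2 k) = true ↔ k ∈ ts) := by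
    intro k hg
    have hrw : (PySem.Set.contains (ts.foldl aStep (([] : List String), (PySem.Set.empty : PySem.Set String))).2 k)
        = List.contains ((ts.foldl aStep (([] : List String), (PySem.Set.empty : PySem.Set String))).2) k := rfl
    rw [hrw, List.contains_iff_mem, foldlA_snd_mem]
    simp [hg]
  have hpw := pairwise_auxA ts PySem.Set.empty
  have hirr : ∀ x y : String, ts.idxOf x < ts.idxOf y → ts.idxOf y < ts.idxOf x → False := by
    intro x y h1 h2; omega
  have hnd : (auxA ts PySem.Set.empty).Nodup := by
    refine hpw.imp_of_mem ?_
    intro a b _ _ hr heq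
    rw [heq] at hr; omega
  have hgm : ∀ x : String, goodTok x = true → x = "copy" ∨ x = "preview" ∨ x = "editor" := by
    intro x hx
    unfold goodTok at hx
    have h2 := (Bool.and_eq_true .. ▸ hx).2
    have hxm : x ∈ (["copy", "preview", "editor"] : List String) := List.contains_iff_mem.1 h2
    simpa using hxm
  have hmemD : ∀ x : String, x ∈ auxA ts PySem.Set.empty ↔ (goodTok x = true ∧ x ∈ ts) := by
    intro x
    rw [mem_auxA]
    simp [PySem.Set.empty]
  have hinj : ∀ a b : String, a ∈ ts → b ∈ ts → ts.idxOf a = ts.idxOf b → a = b := by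
    intro a b ha hb heq
    have h1 := List.getElem_idxOf (x := a) (xs := ts) (List.idxOf_lt_length_of_mem ha)
    have h2 := List.getElem_idxOf (x := b) (xs := ts) (List.idxOf_lt_length_of_mem hb)
    rw [← h1, ← h2]
    congr 1
  by_cases hc : "copy" ∈ ts <;> by_cases hp : "preview" ∈ ts <;> by_cases he : "editor" ∈ ts
  -- case: all three present
  · rw [if_pos ((hcont _ (by decide)).2 hc), if_pos ((hcont _ (by decide)).2 hp),
        if_pos ((hcont _ (by decide)).2 he)]
    have hmem3 : ∀ x : String, x ∈ auxA ts PySem.Set.empty ↔ (x = "copy" ∨ x = "preview" ∨ x = "editor") := by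
      intro x
      rw [hmemD x]
      constructor
      · rintro ⟨hg, -⟩; exact hgm x hg
      · rintro (rfl | rfl | rfl)
        · exact ⟨by decide, hc⟩
        · exact ⟨by decide, hp⟩
        · exact ⟨by decide, he⟩
    rcases lt_trichotomy (ts.idxOf "preview") (ts.idxOf "copy") with h1 | h1 | h1
    · rcases lt_trichotomy (ts.idxOf "editor") (ts.idxOf "preview") with h2 | h2 | h2
      · have hD := eq_triple_of _ _ "editor" "preview" "copy" hpw hirr
          (fun x => by have h := hmem3 x; tauto) (by omega) (by omega) (by omega)
        rw [hD]
        simp only [Nat.cast_lt]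
        split_ifs <;> rfl
      · exact absurd (hinj _ _ he hp h2) (by decide)
      · rcases lt_trichotomy (ts.idxOf "editor") (ts.idxOf "copy") with h3 | h3 | h3
        · have hD := eq_triple_of _ _ "preview" "editor" "copy" hpw hirr
            (fun x => by have h := hmem3 x; tauto) (by omega) (by omega) (by omega)
          rw [hD]
          simp only [Nat.cast_lt]
          split_ifs <;> first | rfl | (exfalso; omega)
        · exact absurd (hinj _ _ he hc h3) (by decide)
        · have hD := eq_triple_of _ _ "preview" "copy" "editor" hpw hirr
            (fun x => by have h := hmem3 x; tauto) (by omega) (by omega) (by omega)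
          rw [hD]
          simp only [Nat.cast_lt]
          split_ifs <;> first | rfl | (exfalso; omega)
    · exact absurd (hinj _ _ hp hc h1) (by decide)
    · rcases lt_trichotomy (ts.idxOf "editor") (ts.idxOf "copy") with h2 | h2 | h2
      · have hD := eq_triple_of _ _ "editor" "copy" "preview" hpw hirr
          (fun x => by have h := hmem3 x; tauto) (by omega) (by omega) (by omega)
        rw [hD]
        simp only [Nat.cast_lt]
        split_ifs <;> first | rfl | (exfalso; omega)
      · exact absurd (hinj _ _ he hc h2) (by decide)
      · rcases lt_trichotomy (ts.idxOf "editor") (ts.idxOf "preview") with h3 | h3 | h3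
        · have hD := eq_triple_of _ _ "copy" "editor" "preview" hpw hirr
            (fun x => by have h := hmem3 x; tauto) (by omega) (by omega) (by omega)
          rw [hD]
          simp only [Nat.cast_lt]
          split_ifs <;> first | rfl | (exfalso; omega)
        · exact absurd (hinj _ _ he hp h3) (by decide)
        · have hD := eq_triple_of _ _ "copy" "preview" "editor" hpw hirr
            (fun x => by have h := hmem3 x; tauto) (by omega) (by omega) (by omega)
          rw [hD]
          simp only [Nat.cast_lt]
          split_ifs <;> first | rfl | (exfalso; omega)
  -- case: copy, preview present; editor absent
  · rw [if_pos ((hcont _ (by decide)).2 hc), if_pos ((hcont _ (by decide)).2 hp),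
        if_neg (fun h => he ((hcont _ (by decide)).1 h))]
    have hmem2 : ∀ x : String, x ∈ auxA ts PySem.Set.empty ↔ (x = "copy" ∨ x = "preview") := by
      intro x
      rw [hmemD x]
      constructor
      · rintro ⟨hg, hxts⟩
        rcases hgm x hg with rfl | rfl | rfl
        · exact Or.inl rfl
        · exact Or.inr rfl
        · exact absurd hxts he
      · rintro (rfl | rfl)
        · exact ⟨by decide, hc⟩
        · exact ⟨by decide, hp⟩
    have hel := List.idxOf_eq_length he
    rcases lt_trichotomy (ts.idxOf "preview") (ts.idxOf "copy") with h1 | h1 | h1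
    · have hD := eq_pair_of _ _ "preview" "copy" hpw hirr (fun x => by have h := hmem2 x; tauto) h1
      rw [hD]
      have := List.idxOf_lt_length_of_mem hc
      simp only [Nat.cast_lt]
      split_ifs <;> first | rfl | (exfalso; omega)
    · exact absurd (hinj _ _ hp hc h1) (by decide)
    · have hD := eq_pair_of _ _ "copy" "preview" hpw hirr (fun x => by have h := hmem2 x; tauto) h1
      rw [hD]
      have := List.idxOf_lt_length_of_mem hp
      simp only [Nat.cast_lt]
      split_ifs <;> first | rfl | (exfalso; omega)
  -- case: copy, editor present; preview absent
  · rw [if_pos ((hcont _ (by decide)).2 hc), if_neg (fun h => hp ((hcont _ (by decide)).1 h)),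
        if_pos ((hcont _ (by decide)).2 he)]
    have hmem2 : ∀ x : String, x ∈ auxA ts PySem.Set.empty ↔ (x = "copy" ∨ x = "editor") := by
      intro x
      rw [hmemD x]
      constructor
      · rintro ⟨hg, hxts⟩
        rcases hgm x hg with rfl | rfl | rfl
        · exact Or.inl rfl
        · exact absurd hxts hp
        · exact Or.inr rfl
      · rintro (rfl | rfl)
        · exact ⟨by decide, hc⟩
        · exact ⟨by decide, he⟩
    have hpl := List.idxOf_eq_length hp
    rcases lt_trichotomy (ts.idxOf "editor") (ts.idxOf "copy") with h1 | h1 | h1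
    · have hD := eq_pair_of _ _ "editor" "copy" hpw hirr (fun x => by have h := hmem2 x; tauto) h1
      rw [hD]
      have := List.idxOf_lt_length_of_mem hc
      simp only [Nat.cast_lt]
      split_ifs <;> first | rfl | (exfalso; omega)
    · exact absurd (hinj _ _ he hc h1) (by decide)
    · have hD := eq_pair_of _ _ "copy" "editor" hpw hirr (fun x => by have h := hmem2 x; tauto) h1
      rw [hD]
      have := List.idxOf_lt_length_of_mem he
      simp only [Nat.cast_lt]
      split_ifs <;> first | rfl | (exfalso; omega)
  -- case: only copy present
  · rw [if_pos ((hcont _ (by decide)).2 hc), if_neg (fun h => hp ((hcont _ (by decide)).1 h)),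
        if_neg (fun h => he ((hcont _ (by decide)).1 h))]
    have hD := eq_singleton_of (auxA ts PySem.Set.empty) "copy" hnd (by
      intro x
      rw [hmemD x]
      constructor
      · rintro ⟨hg, hxts⟩
        rcases hgm x hg with rfl | rfl | rfl
        · rfl
        · exact absurd hxts hp
        · exact absurd hxts he
      · rintro rfl
        exact ⟨by decide, hc⟩)
    rw [hD]
    have := List.idxOf_lt_length_of_mem hc
    have hpl := List.idxOf_eq_length hp
    have hel := List.idxOf_eq_length he
    simp only [Nat.cast_lt]
    split_ifs <;> first | rfl | (exfalso; omega)
  -- case: preview, editor present; copy absent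
  · rw [if_neg (fun h => hc ((hcont _ (by decide)).1 h)), if_pos ((hcont _ (by decide)).2 hp),
        if_pos ((hcont _ (by decide)).2 he)]
    have hmem2 : ∀ x : String, x ∈ auxA ts PySem.Set.empty ↔ (x = "preview" ∨ x = "editor") := by
      intro x
      rw [hmemD x]
      constructor
      · rintro ⟨hg, hxts⟩
        rcases hgm x hg with rfl | rfl | rfl
        · exact absurd hxts hc
        · exact Or.inl rfl
        · exact Or.inr rfl
      · rintro (rfl | rfl)
        · exact ⟨by decide, hp⟩
        · exact ⟨by decide, he⟩
    have hcl := List.idxOf_eq_length hc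
    rcases lt_trichotomy (ts.idxOf "preview") (ts.idxOf "editor") with h1 | h1 | h1
    · have hD := eq_pair_of _ _ "preview" "editor" hpw hirr (fun x => by have h := hmem2 x; tauto) h1
      rw [hD]
      have := List.idxOf_lt_length_of_mem hp
      have := List.idxOf_lt_length_of_mem he
      simp only [Nat.cast_lt]
      split_ifs <;> first | rfl | (exfalso; omega)
    · exact absurd (hinj _ _ hp he h1) (by decide)
    · have hD := eq_pair_of _ _ "editor" "preview" hpw hirr (fun x => by have h := hmem2 x; tauto) h1
      rw [hD]
      have := List.idxOf_lt_length_of_mem hp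
      have := List.idxOf_lt_length_of_mem he
      simp only [Nat.cast_lt]
      split_ifs <;> first | rfl | (exfalso; omega)
  -- case: only preview present
  · rw [if_neg (fun h => hc ((hcont _ (by decide)).1 h)), if_pos ((hcont _ (by decide)).2 hp),
        if_neg (fun h => he ((hcont _ (by decide)).1 h))]
    have hD := eq_singleton_of (auxA ts PySem.Set.empty) "preview" hnd (by
      intro x
      rw [hmemD x]
      constructor
      · rintro ⟨hg, hxts⟩
        rcases hgm x hg with rfl | rfl | rfl
        · exact absurd hxts hc
        · rfl
        · exact absurd hxts he
      · rintro rfl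
        exact ⟨by decide, hp⟩)
    rw [hD]
    have := List.idxOf_lt_length_of_mem hp
    have hcl := List.idxOf_eq_length hc
    have hel := List.idxOf_eq_length he
    simp only [Nat.cast_lt]
    split_ifs <;> first | rfl | (exfalso; omega)
  -- case: only editor present
  · rw [if_neg (fun h => hc ((hcont _ (by decide)).1 h)), if_neg (fun h => hp ((hcont _ (by decide)).1 h)),
        if_pos ((hcont _ (by decide)).2 he)]
    have hD := eq_singleton_of (auxA ts PySem.Set.empty) "editor" hnd (by
      intro x
      rw [hmemD x]
      constructor
      · rintro ⟨hg, hxts⟩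
        rcases hgm x hg with rfl | rfl | rfl
        · exact absurd hxts hc
        · exact absurd hxts hp
        · rfl
      · rintro rfl
        exact ⟨by decide, he⟩)
    rw [hD]
    have := List.idxOf_lt_length_of_mem he
    have hcl := List.idxOf_eq_length hc
    have hpl := List.idxOf_eq_length hp
    simp only [Nat.cast_lt]
    split_ifs <;> first | rfl | (exfalso; omega)
  -- case: none present
  · rw [if_neg (fun h => hc ((hcont _ (by decide)).1 h)), if_neg (fun h => hp ((hcont _ (by decide)).1 h)),
        if_neg (fun h => he ((hcont _ (by decide)).1 h))]
    have hD := eq_nil_of_mem (auxA ts PySem.Set.empty) (by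
      intro x hx
      obtain ⟨hg, hxts⟩ := (hmemD x).1 hx
      rcases hgm x hg with rfl | rfl | rfl
      · exact hc hxts
      · exact hp hxts
      · exact he hxts)
    rw [hD]
    have hcl := List.idxOf_eq_length hc
    have hpl := List.idxOf_eq_length hp
    have hel := List.idxOf_eq_length he
    simp only [Nat.cast_lt]
    split_ifs <;> first | rfl | (exfalso; omega)

-- ===== VERDICT (by name: the statement is the Claim_ definition above) =====
theorem parse_action_order_py_spec : Claim_equal_parse_action_order_py := by
  intro value _
  unfold Spec_parse_action_order_py parse_action_order_py parse_action_order_py_alt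
  exact core _
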